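-- pv_equiv track=rewrite | github.com/ThijsVerkade/OrbitalSurvey | orbitalsurvey.py | getHighestPoint
-- ===== SOURCE A (Python) =====
-- def decimalToBinary(decimal):
--     return "{0:b}".format(decimal)
--
-- def binaryToList(binary):
--     return list(map(int, str(binary)))
--
-- def getHighestPointRows(rows):
--     counter=0
--     for x in rows:
--         if x == 0:
--             return counter
--         counter += 1
--     return counter
--
-- def parseRows(binaryList ,start, end):
--     return binaryList[start:end]
--
-- def parseColumns(rows, row):
--     column=[]
--     for x in rows:
--         column.insert(0,x[row])
--     return column
--
-- def generateTable(binaryList, rows, columns):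
--     allRows=[]
--     for x in range(rows):
--         start=x*columns
--         end=(x+1)*columns
--         allRows.append(parseRows(binaryList,start,end))
--     return allRows
--
-- def getHighestPoint(rows, columns, decimal):
--     binary=decimalToBinary(decimal)
--     amountCols=rows*columns
--
--     if(amountCols > len(binary)):
--         binary=(amountCols-len(binary))*"0"+str(binary)
--     else:
--         binary[0:amountCols]
--
--     binaryList=binaryToList(binary)
--     highestPoint=0
--
--     allRows=generateTable(binaryList, rows, columns)
--
--     for x in range(len(allRows)):
--         newPoint=getHighestPointRows(parseColumns(allRows, x))
--         if(newPoint > highestPoint):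
--             highestPoint = newPoint
--
--     return highestPoint
-- ===== SOURCE B (Python) =====
-- def getHighestPoint(rows, columns, decimal):
--     b = format(decimal, "b")
--     n = rows * columns
--     if n > len(b):
--         b = "0" * (n - len(b)) + b
--     best = 0
--     for j in range(rows):
--         cnt = 0
--         for r in range(rows - 1, -1, -1):
--             if b[r * columns + j] != "1":
--                 break
--             cnt += 1
--         if cnt > best:
--             best = cnt
--     return best
-- ===== Notes on version B (the rewrite author's own statement) =====
-- stated objective: faster
-- what changed: B never builds A's table of row-slices or its per-column reversed lists (built with O(rows) front-inserts each): it indexes the padded bit string directly, counting each column's run of '1' bits upward from the bottom row with an early break.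
-- outside the precondition, e.g. on getHighestPoint(1, -2, 7): A returns 1, B returns 1
import Mathlib
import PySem

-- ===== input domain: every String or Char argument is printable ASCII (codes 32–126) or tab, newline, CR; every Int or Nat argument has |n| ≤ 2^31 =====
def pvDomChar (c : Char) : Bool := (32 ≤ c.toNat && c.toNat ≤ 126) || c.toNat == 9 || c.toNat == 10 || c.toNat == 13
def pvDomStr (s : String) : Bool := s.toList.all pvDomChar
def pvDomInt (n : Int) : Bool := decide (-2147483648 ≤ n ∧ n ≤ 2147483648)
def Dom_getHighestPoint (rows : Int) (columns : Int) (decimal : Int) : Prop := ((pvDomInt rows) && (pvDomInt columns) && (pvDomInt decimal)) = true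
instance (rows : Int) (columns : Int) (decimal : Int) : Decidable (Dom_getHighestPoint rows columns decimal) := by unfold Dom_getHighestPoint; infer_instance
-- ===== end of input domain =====

-- B drops A's table/column-list construction entirely: it indexes the padded bit string
-- directly, counting the run of '1' bits upward from the bottom row of each column
-- (with early break), which avoids A's per-column list rebuilding and front-inserts.

-- ===== PORT A =====
-- strings are handled as List Char (PySem.Chars side); "{0:b}".format(decimal) is PySem.Int.toBinChars
def decimalToBinary (decimal : Int) : List Char := PySem.Int.toBinChars decimal

-- list(map(int, binary)); none = ValueError (int('-') on a negative decimal), excluded by Pre_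
def binaryToList? (binary : List Char) : Option (List Int) :=
  binary.mapM (fun c => PySem.Int.ofChars? [c])

-- counter loop with early return
def getHighestPointRows : List Int → Int → Int
  | [], counter => counter
  | x :: xs, counter => if x = 0 then counter else getHighestPointRows xs (counter + 1)

def parseRows (binaryList : List Int) (start stop : Int) : List Int :=
  PySem.List.slice binaryList (some start) (some stop)

-- column=[]; for x in rows: column.insert(0, x[row]); none = IndexError on x[row], excluded by Pre_
def parseColumns? (rowsL : List (List Int)) (row : Int) : Option (List Int) :=
  rowsL.foldl (fun col? x => col?.bind fun col =>
    (PySem.List.pyGet? x row).map (fun v => v :: col)) (some [])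

def generateTable (binaryList : List Int) (rows columns : Int) : List (List Int) :=
  (PySem.List.pyRange 0 rows 1).foldl
    (fun allRows x => allRows ++ [parseRows binaryList (x * columns) ((x + 1) * columns)]) []

def getHighestPoint (rows : Int) (columns : Int) (decimal : Int) : Int :=
  let binary := decimalToBinary decimal
  let amountCols := rows * columns
  -- (amountCols-len(binary))*"0" + binary; the else branch's bare 'binary[0:amountCols]' is a no-op
  let binary := if amountCols > (binary.length : Int) then
      List.replicate (amountCols - (binary.length : Int)).toNat '0' ++ binary
    else binary
  match binaryToList? binary with
  | none => 0      -- Python raises ValueError here; excluded by Pre_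
  | some binaryList =>
    let allRows := generateTable binaryList rows columns
    ((PySem.List.pyRange 0 (allRows.length : Int) 1).foldl
      (fun hp? x => hp?.bind fun hp =>
        (parseColumns? allRows x).map fun col =>
          let newPoint := getHighestPointRows col 0
          if newPoint > hp then newPoint else hp) (some 0)).getD 0
      -- .getD 0 is only the escape for the IndexError case (none), excluded by Pre_

-- ===== PORT B =====
-- for r in range(rows-1,-1,-1): if b[r*columns+j] != "1": break; cnt += 1
-- (pyGet? = none is Python's IndexError; it cannot occur under Pre_)
def bColCount (b : List Char) (columns j : Int) : List Int → Int → Int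
  | [], cnt => cnt
  | r :: rest, cnt =>
      match PySem.List.pyGet? b (r * columns + j) with
      | none => cnt
      | some ch => if ch ≠ '1' then cnt else bColCount b columns j rest (cnt + 1)

def getHighestPoint_alt (rows : Int) (columns : Int) (decimal : Int) : Int :=
  let b := PySem.Int.toBinChars decimal
  let n := rows * columns
  let b := if n > (b.length : Int) then
      List.replicate (n - (b.length : Int)).toNat '0' ++ b
    else b
  (PySem.List.pyRange 0 rows 1).foldl
    (fun best j =>
      let cnt := bColCount b columns j (PySem.List.pyRange (rows - 1) (-1) (-1)) 0
      if cnt > best then cnt else best) 0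

-- ===== PRECONDITION & SPEC =====
-- Pre_ excludes inputs where A raises (ValueError for decimal < 0; IndexError whenever
-- 0 ≤ columns < rows) and negative column counts, which are outside the function's natural
-- domain: there A raises too except in the accidental corner rows = 1 ∧ columns < 0 ∧
-- decimal ≥ 2^(-columns), where A's value 1 comes from a negative-index slice.
def Pre_getHighestPoint (rows : Int) (columns : Int) (decimal : Int) : Prop :=
  0 ≤ decimal ∧ (rows ≤ 0 ∨ rows ≤ columns)
instance (rows : Int) (columns : Int) (decimal : Int) : Decidable (Pre_getHighestPoint rows columns decimal) := by unfold Pre_getHighestPoint; infer_instance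

def pvWitness_getHighestPoint : Int × Int × Int := (2, 3, 5)

def Spec_getHighestPoint (rows : Int) (columns : Int) (decimal : Int) (out : Int) : Prop := out = getHighestPoint_alt rows columns decimal
instance (rows : Int) (columns : Int) (decimal : Int) (out : Int) : Decidable (Spec_getHighestPoint rows columns decimal out) := by unfold Spec_getHighestPoint; infer_instance

-- ===== CLAIM (what is proved, stated in full; the proofs are below) =====
def Claim_equal_getHighestPoint : Prop := ∀ (rows : Int) (columns : Int) (decimal : Int), Dom_getHighestPoint rows columns decimal → Pre_getHighestPoint rows columns decimal → Spec_getHighestPoint rows columns decimal (getHighestPoint rows columns decimal)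

-- ===== LEMMAS AND PROOFS =====

-- the integer value of a bit character
def chVal (c : Char) : Int := if c = '1' then 1 else 0

theorem toDigitsCore_two_bits : ∀ (fuel n : Nat) (acc : List Char),
    (∀ c ∈ acc, c = '0' ∨ c = '1') → ∀ c ∈ Nat.toDigitsCore 2 fuel n acc, c = '0' ∨ c = '1' := by
  intro fuel
  induction fuel with
  | zero => intro n acc hacc c hc; exact hacc c (by simpa [Nat.toDigitsCore] using hc)
  | succ fuel ih =>
    intro n acc hacc c hc
    have hd : (n % 2).digitChar = '0' ∨ (n % 2).digitChar = '1' := by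
      rcases Nat.mod_two_eq_zero_or_one n with h | h <;> rw [h] <;> [left; right] <;> rfl
    rw [Nat.toDigitsCore] at hc
    by_cases hz : n / 2 = 0
    · simp only [hz, if_pos] at hc
      rcases List.mem_cons.mp hc with rfl | hc
      · exact hd
      · exact hacc c hc
    · simp only [if_neg hz] at hc
      refine ih (n/2) _ ?_ c hc
      intro d hdm
      rcases List.mem_cons.mp hdm with rfl | hdm
      · exact hd
      · exact hacc d hdm

theorem toBinChars_bits (d : Int) (hd : 0 ≤ d) :
    ∀ c ∈ PySem.Int.toBinChars d, c = '0' ∨ c = '1' := by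
  have h : ¬ d < 0 := by omega
  simp only [PySem.Int.toBinChars, h, if_false, Nat.toDigits]
  exact toDigitsCore_two_bits _ _ [] (by simp)

theorem parseColumns?_loop (j : Int) (v : List Int → Int) :
    ∀ (rs : List (List Int)), (∀ row ∈ rs, PySem.List.pyGet? row j = some (v row)) →
    ∀ acc, rs.foldl (fun col? x => col?.bind fun col =>
      (PySem.List.pyGet? x j).map (fun w => w :: col)) (some acc)
        = some ((rs.map v).reverse ++ acc) := by
  intro rs
  induction rs with
  | nil => intro _ acc; simp
  | cons r rs ih =>
    intro h acc
    simp only [List.foldl_cons, Option.bind_some, h r (by simp), Option.map_some]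
    rw [ih (fun row hm => h row (by simp [hm])) (v r :: acc)]
    simp

theorem parseColumns?_eq (j : Int) (v : List Int → Int) (rs : List (List Int))
    (h : ∀ row ∈ rs, PySem.List.pyGet? row j = some (v row)) :
    parseColumns? rs j = some ((rs.map v).reverse) := by
  unfold parseColumns?
  simpa using parseColumns?_loop j v rs h []

theorem count_agree (L : List Char) (columns j : Int) :
    ∀ (R : List Int) (k : Int), (∀ r ∈ R, (PySem.List.pyGet? L (r * columns + j)).isSome) →
    getHighestPointRows (R.map (fun r => chVal ((PySem.List.pyGet? L (r * columns + j)).getD '0'))) k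
      = bColCount L columns j R k := by
  intro R
  induction R with
  | nil => intro k _; rfl
  | cons r R ih =>
    intro k h
    obtain ⟨ch, hch⟩ := Option.isSome_iff_exists.mp (h r (by simp))
    simp only [List.map_cons, getHighestPointRows, bColCount, hch, Option.getD_some]
    by_cases h1 : ch = '1'
    · simp only [h1, chVal, if_pos]
      norm_num
      exact ih (k+1) (fun r hr => h r (by simp [hr]))
    · simp [chVal, h1]

theorem outer_fold_some (table : List (List Int)) (col : Int → List Int) :
    ∀ (idx : List Int), (∀ x ∈ idx, parseColumns? table x = some (col x)) →
    ∀ acc : Int, idx.foldl (fun hp? x => hp?.bind fun hp =>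
        (parseColumns? table x).map fun c =>
          let newPoint := getHighestPointRows c 0
          if newPoint > hp then newPoint else hp) (some acc)
      = some (idx.foldl (fun hp x =>
          let newPoint := getHighestPointRows (col x) 0
          if newPoint > hp then newPoint else hp) acc) := by
  intro idx
  induction idx with
  | nil => intro _ acc; rfl
  | cons x idx ih =>
    intro h acc
    simp only [List.foldl_cons, Option.bind_some, h x (by simp), Option.map_some]
    exact ih (fun y hy => h y (by simp [hy])) _

theorem row_get (BL : List Int) (c a jn : Nat) (hj : jn < c)
    (hlen : (a+1) * c ≤ BL.length) :
    PySem.List.pyGet? (parseRows BL ((a:Int) * (c:Int)) (((a:Int)+1) * (c:Int))) (jn:Int)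
      = some BL[a*c+jn]! := by
  have h1 : ((a:Int) * c) = ((a*c : Nat) : Int) := by push_cast; ring
  have h2 : (((a:Int)+1) * c) = (((a+1)*c : Nat) : Int) := by push_cast; ring
  rw [parseRows, h1, h2, PySem.List.slice_natCast, PySem.List.pyGet?_natCast]
  have hsub : (a+1)*c - a*c = c := by
    have : (a+1)*c = a*c + c := by ring
    omega
  rw [hsub]
  have hi : a*c+jn < BL.length := by
    have : (a+1)*c = a*c + c := by ring
    omega
  rw [List.getElem?_take_of_lt hj, List.getElem?_drop]
  rw [List.getElem?_eq_getElem hi, getElem!_pos BL _ hi]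

def aRest (rows columns : Int) (bl? : Option (List Int)) : Int :=
  match bl? with
  | none => 0
  | some binaryList =>
    let allRows := generateTable binaryList rows columns
    ((PySem.List.pyRange 0 (allRows.length : Int) 1).foldl
      (fun hp? x => hp?.bind fun hp =>
        (parseColumns? allRows x).map fun col =>
          let newPoint := getHighestPointRows col 0
          if newPoint > hp then newPoint else hp) (some 0)).getD 0

def bRest (rows columns : Int) (b : List Char) : Int :=
  (PySem.List.pyRange 0 rows 1).foldl
    (fun best j =>
      let cnt := bColCount b columns j (PySem.List.pyRange (rows - 1) (-1) (-1)) 0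
      if cnt > best then cnt else best) 0

theorem binaryToList?_eq (l : List Char) (h : ∀ c ∈ l, c = '0' ∨ c = '1') :
    binaryToList? l = some (l.map chVal) := by
  induction l with
  | nil => rfl
  | cons a l ih =>
    have ha : PySem.Int.ofChars? [a] = some (chVal a) := by
      rcases h a (by simp) with rfl | rfl <;> rfl
    have ih' := ih (fun c hc => h c (by simp [hc]))
    simp only [binaryToList?, List.mapM_cons] at *
    rw [ha, ih']
    rfl

theorem main_core (m c : Nat) (hmc : m ≤ c) (L : List Char)
    (hbits : ∀ ch ∈ L, ch = '0' ∨ ch = '1') (hlen : m * c ≤ L.length) :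
    aRest (m : Int) (c : Int) (binaryToList? L) = bRest (m : Int) (c : Int) L := by
  rw [binaryToList?_eq L hbits]
  set BL := L.map chVal with hBLdef
  have hBLlen : BL.length = L.length := by simp [hBLdef]
  have htab : generateTable BL (m : Int) (c : Int)
      = (PySem.List.pyRange 0 (m : Int) 1).map (fun x => parseRows BL (x * (c:Int)) ((x + 1) * (c:Int))) := by
    unfold generateTable
    simpa using PySem.List.foldl_append_singleton_eq_map
      (fun x => parseRows BL (x * (c:Int)) ((x + 1) * (c:Int))) (PySem.List.pyRange 0 (m:Int) 1) []
  have hrowget : ∀ x ∈ PySem.List.pyRange 0 (m:Int) 1, ∀ j ∈ PySem.List.pyRange 0 (m:Int) 1,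
      PySem.List.pyGet? (parseRows BL (x * (c:Int)) ((x + 1) * (c:Int))) j
        = some BL[x.toNat * c + j.toNat]! := by
    intro x hx j hj
    obtain ⟨hx0, hxm⟩ := PySem.List.mem_pyRange_one.mp hx
    obtain ⟨hj0, hjm⟩ := PySem.List.mem_pyRange_one.mp hj
    have hxa : x = ((x.toNat : Nat) : Int) := (Int.toNat_of_nonneg hx0).symm
    have hja : j = ((j.toNat : Nat) : Int) := (Int.toNat_of_nonneg hj0).symm
    rw [hxa, hja]
    refine row_get BL c x.toNat j.toNat (by omega) ?_
    have hx1 : x.toNat + 1 ≤ m := by omega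
    calc (x.toNat + 1) * c ≤ m * c := Nat.mul_le_mul_right c hx1
      _ ≤ L.length := hlen
      _ = BL.length := hBLlen.symm
  have hLget : ∀ x ∈ PySem.List.pyRange 0 (m:Int) 1, ∀ j ∈ PySem.List.pyRange 0 (m:Int) 1,
      PySem.List.pyGet? L (x * (c:Int) + j) = some L[x.toNat * c + j.toNat]! := by
    intro x hx j hj
    obtain ⟨hx0, hxm⟩ := PySem.List.mem_pyRange_one.mp hx
    obtain ⟨hj0, hjm⟩ := PySem.List.mem_pyRange_one.mp hj
    have hidx : x * (c:Int) + j = ((x.toNat * c + j.toNat : Nat) : Int) := by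
      push_cast [Int.toNat_of_nonneg hx0, Int.toNat_of_nonneg hj0]; ring
    have hi : x.toNat * c + j.toNat < L.length := by
      have hx1 : x.toNat + 1 ≤ m := by omega
      have h2 : (x.toNat + 1) * c ≤ m * c := Nat.mul_le_mul_right c hx1
      have h3 : j.toNat < c := by omega
      have : (x.toNat + 1) * c = x.toNat * c + c := by ring
      omega
    rw [hidx, PySem.List.pyGet?_natCast, List.getElem?_eq_getElem hi, getElem!_pos L _ hi]
  have hval : ∀ x ∈ PySem.List.pyRange 0 (m:Int) 1, ∀ j ∈ PySem.List.pyRange 0 (m:Int) 1,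
      (BL[x.toNat * c + j.toNat]! : Int) = chVal ((PySem.List.pyGet? L (x * (c:Int) + j)).getD '0') := by
    intro x hx j hj
    rw [hLget x hx j hj, Option.getD_some]
    obtain ⟨hx0, hxm⟩ := PySem.List.mem_pyRange_one.mp hx
    obtain ⟨hj0, hjm⟩ := PySem.List.mem_pyRange_one.mp hj
    have hi : x.toNat * c + j.toNat < L.length := by
      have hx1 : x.toNat + 1 ≤ m := by omega
      have h2 : (x.toNat + 1) * c ≤ m * c := Nat.mul_le_mul_right c hx1
      have : (x.toNat + 1) * c = x.toNat * c + c := by ring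
      omega
    have hi' : x.toNat * c + j.toNat < BL.length := by rw [hBLlen]; exact hi
    rw [getElem!_pos BL _ hi', getElem!_pos L _ hi]
    simp [hBLdef]
  set colF : Int → List Int := fun j =>
    ((generateTable BL (m:Int) (c:Int)).map (fun row => (PySem.List.pyGet? row j).getD 0)).reverse
    with hcolF
  have hpc : ∀ j ∈ PySem.List.pyRange 0 (m:Int) 1,
      parseColumns? (generateTable BL (m:Int) (c:Int)) j = some (colF j) := by
    intro j hj
    apply parseColumns?_eq
    intro row hrow
    rw [htab] at hrow
    obtain ⟨x, hx, rfl⟩ := List.mem_map.mp hrow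
    simp [hrowget x hx j hj]
  have hlen_tab : (((generateTable BL (m:Int) (c:Int)).length : Nat) : Int) = (m : Int) := by
    rw [htab]
    simp [PySem.List.length_pyRange_one]
  have hR : PySem.List.pyRange ((m:Int) - 1) (-1) (-1) = (PySem.List.pyRange 0 (m:Int) 1).reverse := by
    have h := PySem.List.pyRange_neg_one_eq_reverse ((m:Int) - 1) (-1)
    norm_num at h
    exact h
  simp only [aRest, bRest]
  rw [hlen_tab, outer_fold_some _ colF _ hpc 0, Option.getD_some]
  apply PySem.List.foldl_congr_mem
  intro acc j hj
  have hcnt : getHighestPointRows (colF j) 0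
      = bColCount L (c:Int) j (PySem.List.pyRange ((m:Int) - 1) (-1) (-1)) 0 := by
    have hcol : colF j = ((PySem.List.pyRange 0 (m:Int) 1).reverse).map
        (fun x => chVal ((PySem.List.pyGet? L (x * (c:Int) + j)).getD '0')) := by
      rw [hcolF]
      simp only [htab, List.map_map, ← List.map_reverse]
      apply List.map_congr_left
      intro x hx
      have hx' := List.mem_reverse.mp hx
      simp only [Function.comp]
      rw [hrowget x hx' j hj, Option.getD_some, hval x hx' j hj]
    rw [hcol, hR]
    apply count_agree
    intro r hr
    rw [List.mem_reverse] at hr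
    rw [hLget r hr j hj]
    rfl
  simp only [hR, hcnt]

-- the bit string both ports build before their loops (proof-side name for the shared first lines)
def padded (rows columns decimal : Int) : List Char :=
  let binary := PySem.Int.toBinChars decimal
  if rows * columns > (binary.length : Int) then
    List.replicate (rows * columns - (binary.length : Int)).toNat '0' ++ binary
  else binary

theorem padded_bits (rows columns decimal : Int) (hd : 0 ≤ decimal) :
    ∀ ch ∈ padded rows columns decimal, ch = '0' ∨ ch = '1' := by
  intro ch hch
  simp only [padded] at hch
  split at hch
  · rcases List.mem_append.mp hch with h | h
    · exact Or.inl (List.eq_of_mem_replicate h)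
    · exact toBinChars_bits decimal hd ch h
  · exact toBinChars_bits decimal hd ch hch

theorem padded_len (m c : Nat) (decimal : Int) :
    m * c ≤ (padded (m : Int) (c : Int) decimal).length := by
  have hmc : ((m : Int)) * (c : Int) = ((m * c : Nat) : Int) := by push_cast; ring
  simp only [padded]
  rw [hmc]
  split
  · next h =>
    simp only [List.length_append, List.length_replicate]
    omega
  · next h => omega

theorem A_eq (rows columns decimal : Int) :
    getHighestPoint rows columns decimal
      = aRest rows columns (binaryToList? (padded rows columns decimal)) := rfl

theorem B_eq (rows columns decimal : Int) :
    getHighestPoint_alt rows columns decimal = bRest rows columns (padded rows columns decimal) := rfl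

theorem main_case (rows columns decimal : Int) (hd : 0 ≤ decimal)
    (h1 : 1 ≤ rows) (hrc : rows ≤ columns) :
    getHighestPoint rows columns decimal = getHighestPoint_alt rows columns decimal := by
  obtain ⟨m, rfl⟩ : ∃ m : Nat, rows = (m : Int) := ⟨rows.toNat, (Int.toNat_of_nonneg (by omega)).symm⟩
  obtain ⟨c, rfl⟩ : ∃ c : Nat, columns = (c : Int) := ⟨columns.toNat, (Int.toNat_of_nonneg (by omega)).symm⟩
  rw [A_eq, B_eq]
  exact main_core m c (by exact_mod_cast hrc)
    (padded (m : Int) (c : Int) decimal)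
    (padded_bits (m : Int) (c : Int) decimal hd)
    (padded_len m c decimal)

-- ===== VERDICT (by name: the statement is the Claim_ definition above) =====
theorem getHighestPoint_spec : Claim_equal_getHighestPoint := by
  intro rows columns decimal _hdom hpre
  obtain ⟨hd, hrc⟩ := hpre
  unfold Spec_getHighestPoint
  by_cases hr0 : rows ≤ 0
  · -- rows ≤ 0: both loops are empty and both return 0
    have hnil : PySem.List.pyRange 0 rows 1 = [] := PySem.List.pyRange_one_eq_nil hr0
    simp [getHighestPoint, getHighestPoint_alt, generateTable, hnil]
    split <;> rfl
  · have hrc' : rows ≤ columns := by rcases hrc with h | h; omega; exact h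
    exact main_case rows columns decimal hd (by omega) hrc'
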